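-- pv_equiv track=rewrite | github.com/alexandraback/datacollection | solutions_2751486_0/Python/manolo/a.py | consecutive_consonants
-- ===== SOURCE A (Python) =====
-- vowels = ['a', 'e', 'i', 'o', 'u']
--
-- def consecutive_consonants(name, n):
--     current_con = 0
--     for char in name:
--         if char in vowels:
--             if current_con >= n:
--                 return 1
--             current_con = 0
--         else:
--             current_con += 1
--
--     if current_con >= n:
--         return 1
--     else:
--         return 0
-- ===== SOURCE B (Python) =====
-- def consecutive_consonants(name, n):
--     # gap-between-vowels algorithm: longest consonant run = largest gap
--     # between consecutive vowel positions (with sentinels -1 and len(name))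
--     cuts = [-1] + [i for i, c in enumerate(name) if c in 'aeiou'] + [len(name)]
--     longest = max(b - a - 1 for a, b in zip(cuts, cuts[1:]))
--     return 1 if longest >= n else 0
-- ===== Notes on version B (the rewrite author's own statement) =====
-- stated objective: alternative
-- what changed: A's stateful running-counter scan with reset and early return is replaced by a gap computation: collect the vowel positions with sentinels -1 and len(name), take the maximum gap between consecutive positions (= longest consonant run), and compare it with n once.
import Mathlib
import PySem

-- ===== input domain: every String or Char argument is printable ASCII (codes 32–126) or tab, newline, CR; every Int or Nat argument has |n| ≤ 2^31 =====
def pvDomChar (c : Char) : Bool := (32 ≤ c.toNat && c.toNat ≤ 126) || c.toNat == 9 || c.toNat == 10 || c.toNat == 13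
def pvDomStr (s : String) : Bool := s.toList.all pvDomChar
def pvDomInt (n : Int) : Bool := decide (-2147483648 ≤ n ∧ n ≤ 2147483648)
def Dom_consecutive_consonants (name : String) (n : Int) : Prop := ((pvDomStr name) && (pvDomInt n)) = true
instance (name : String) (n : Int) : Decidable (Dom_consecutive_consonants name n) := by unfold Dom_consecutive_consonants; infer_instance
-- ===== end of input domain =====

-- B replaces A's stateful running-counter-with-reset scan (with early return) by a
-- gap-between-vowel-positions computation: longest consonant run = max gap between
-- consecutive vowel indices (with sentinels -1 and len(name)); objective: alternative.

-- ===== PORT A =====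
def pvVowels : List Char := ['a', 'e', 'i', 'o', 'u']

-- the for-loop of A, with its early `return 1` and the trailing check
def pvLoopA : List Char → Int → Int → Int
  | [], current_con, n => if current_con ≥ n then 1 else 0
  | char :: rest, current_con, n =>
    if pvVowels.contains char then
      (if current_con ≥ n then 1 else pvLoopA rest 0 n)
    else
      pvLoopA rest (current_con + 1) n

def consecutive_consonants (name : String) (n : Int) : Int :=
  pvLoopA name.toList 0 n

-- ===== PORT B =====
def pvVowelStr : List Char := "aeiou".toList   -- Source B's 'aeiou'

def consecutive_consonants_alt (name : String) (n : Int) : Int :=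
  let cs := name.toList
  -- cuts = [-1] + [i for i, c in enumerate(name) if c in 'aeiou'] + [len(name)]
  let cuts : List Int :=
    [-1] ++ ((PySem.List.enumerate cs).filter (fun ic => pvVowelStr.contains ic.2)).map (·.1)
         ++ [(cs.length : Int)]
  -- longest = max(b - a - 1 for a, b in zip(cuts, cuts[1:]))  (cuts[1:] = tail; exact)
  let gaps := (cuts.zip cuts.tail).map (fun ab => ab.2 - ab.1 - 1)
  match gaps with
  | [] => 0  -- unreachable: cuts always has at least two elements
  | g :: gs => if gs.foldl max g ≥ n then 1 else 0

-- ===== PRECONDITION & SPEC =====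
def Spec_consecutive_consonants (name : String) (n : Int) (out : Int) : Prop := out = consecutive_consonants_alt name n
instance (name : String) (n : Int) (out : Int) : Decidable (Spec_consecutive_consonants name n out) := by unfold Spec_consecutive_consonants; infer_instance

-- ===== CLAIM (what is proved, stated in full; the proofs are below) =====
def Claim_equal_consecutive_consonants : Prop := ∀ (name : String) (n : Int), Dom_consecutive_consonants name n → Spec_consecutive_consonants name n (consecutive_consonants name n)

-- ===== LEMMAS AND PROOFS =====

-- longest consonant run still ahead, given a current run of length `cur`
def pvBest : List Char → Int → Int
  | [], cur => cur
  | c :: rest, cur => if pvVowels.contains c then max cur (pvBest rest 0) else pvBest rest (cur + 1)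

-- max gap between consecutive cut positions prev :: ps ++ [L], each gap b - a - 1
def pvGapMax : Int → List Int → Int → Int
  | prev, [], L => L - prev - 1
  | prev, p :: ps, L => max (p - prev - 1) (pvGapMax p ps L)

def pvPos (cs : List Char) (s : Int) : List Int :=
  ((PySem.List.enumerate cs s).filter (fun ic => pvVowelStr.contains ic.2)).map (·.1)

theorem pvLoopA_eq_best (cs : List Char) (cur n : Int) :
    pvLoopA cs cur n = if n ≤ pvBest cs cur then 1 else 0 := by
  induction cs generalizing cur with
  | nil => simp [pvLoopA, pvBest]
  | cons c rest ih =>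
    simp only [pvLoopA, pvBest]
    by_cases hb : pvVowels.contains c
    · simp only [hb, if_true, ih]
      by_cases h1 : n ≤ cur
      · simp [h1, le_max_iff]
      · by_cases h2 : n ≤ pvBest rest 0 <;> simp [h1, h2, le_max_iff]
    · simp only [hb, if_false, ih]
      simp [hb]

theorem pvVowelStr_eq : pvVowelStr = pvVowels := by decide

theorem pvPos_cons (c : Char) (rest : List Char) (s : Int) :
    pvPos (c :: rest) s =
      if pvVowels.contains c then s :: pvPos rest (s + 1) else pvPos rest (s + 1) := by
  simp only [pvPos, pvVowelStr_eq, PySem.List.enumerate_cons, List.filter_cons]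
  by_cases h : c ∈ pvVowels <;> simp [h]

theorem pvBest_eq_gapMax (cs : List Char) (s cur : Int) :
    pvBest cs cur = pvGapMax (s - cur - 1) (pvPos cs s) (s + cs.length) := by
  induction cs generalizing s cur with
  | nil => simp [pvBest, pvPos, pvGapMax]; omega
  | cons c rest ih =>
    rw [pvPos_cons]
    by_cases hb : pvVowels.contains c
    · simp only [pvBest, hb, if_true, pvGapMax]
      have h3 := ih (s + 1) 0
      rw [show (s + 1 : Int) - 0 - 1 = s by omega] at h3
      rw [show s - (s - cur - 1) - 1 = cur by omega,
        show (s : Int) + ((c :: rest).length : Int) = s + 1 + (rest.length : Int) by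
          push_cast [List.length_cons]; ring,
        ← h3]
    · simp only [pvBest, hb, if_false, Bool.false_eq_true]
      have h3 := ih (s + 1) (cur + 1)
      rw [show (s + 1 : Int) - (cur + 1) - 1 = s - cur - 1 by omega] at h3
      rw [show (s : Int) + ((c :: rest).length : Int) = s + 1 + (rest.length : Int) by
          push_cast [List.length_cons]; ring]
      exact h3

theorem pvFold_gaps (ps : List Int) (prev L a : Int) :
    (((prev :: ps ++ [L]).zip (ps ++ [L])).map (fun ab => ab.2 - ab.1 - 1)).foldl max a =
      max a (pvGapMax prev ps L) := by
  induction ps generalizing prev a with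
  | nil => simp [pvGapMax]
  | cons p ps ih =>
    simp only [List.cons_append, List.zip_cons_cons, List.map_cons, List.foldl_cons, pvGapMax]
    simp only [List.cons_append] at ih
    rw [ih, max_assoc]

theorem pvPortB_eq (ps : List Int) (prev L n : Int) :
    (match ((prev :: ps ++ [L]).zip ((prev :: ps ++ [L]).tail)).map
        (fun ab => ab.2 - ab.1 - 1) with
      | [] => (0 : Int)
      | g :: gs => if gs.foldl max g ≥ n then 1 else 0)
      = if n ≤ pvGapMax prev ps L then 1 else 0 := by
  cases ps with
  | nil => simp [pvGapMax, ge_iff_le]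
  | cons p ps =>
    simp only [List.cons_append, List.tail_cons, List.zip_cons_cons, List.map_cons]
    have h := pvFold_gaps ps p L (p - prev - 1)
    simp only [List.cons_append] at h
    rw [h]
    simp [pvGapMax, ge_iff_le]

-- ===== VERDICT (by name: the statement is the Claim_ definition above) =====
theorem consecutive_consonants_spec : Claim_equal_consecutive_consonants := by
  intro name n _
  unfold Spec_consecutive_consonants consecutive_consonants consecutive_consonants_alt
  rw [pvLoopA_eq_best, pvBest_eq_gapMax name.toList 0 0,
    show (0 : Int) - 0 - 1 = -1 by norm_num,
    show (0 : Int) + (name.toList.length : Int) = (name.toList.length : Int) by omega]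
  simp only [pvPos, pvVowelStr_eq]
  exact (pvPortB_eq _ (-1) (name.toList.length : Int) n).symm
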